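-- pv_equiv track=rewrite | github.com/adiabatic/abbots-morton-spaceport | tools/build_font.py | _split_family_compiled_name
-- ===== SOURCE A (Python) =====
-- def get_base_glyph_name(prop_glyph_name: str) -> str:
--     """Get the base glyph name from a proportional glyph name.
--
--     Strips .prop from the end or middle of the name:
--       qsPea.prop       → qsPea
--       qsFee_qsMay.prop → qsFee_qsMay
--       U.prop.narrow    → U.narrow
--     """
--     if prop_glyph_name.endswith(".prop"):
--         return prop_glyph_name[:-5]
--     if ".prop." in prop_glyph_name:
--         return prop_glyph_name.replace(".prop.", ".", 1)
--     return prop_glyph_name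
--
-- _SOURCE_FAMILY_TRAITS = frozenset({"alt", "half"})
--
-- def _split_family_compiled_name(
--     glyph_name: str,
--     family_names: set[str],
-- ) -> tuple[str, tuple[str, ...], tuple[str, ...]] | None:
--     normalized = get_base_glyph_name(glyph_name)
--     family_name = None
--     for candidate in sorted(family_names, key=len, reverse=True):
--         if normalized == candidate or normalized.startswith(candidate + "."):
--             family_name = candidate
--             break
--     if family_name is None:
--         return None
--
--     suffix = normalized[len(family_name):].removeprefix(".")
--     if not suffix:
--         return family_name, (), ()
--
--     traits = []
--     modifiers = []
--     for token in suffix.split("."):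
--         if token in _SOURCE_FAMILY_TRAITS:
--             traits.append(token)
--         else:
--             modifiers.append(token)
--     return family_name, tuple(traits), tuple(modifiers)
-- ===== SOURCE B (Python) =====
-- def get_base_glyph_name(prop_glyph_name: str) -> str:
--     if prop_glyph_name.endswith(".prop"):
--         return prop_glyph_name[:-5]
--     if ".prop." in prop_glyph_name:
--         return prop_glyph_name.replace(".prop.", ".", 1)
--     return prop_glyph_name
--
-- _SOURCE_FAMILY_TRAITS = frozenset({"alt", "half"})
--
-- def _split_family_compiled_name(glyph_name, family_names):
--     normalized = get_base_glyph_name(glyph_name)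
--     parts = normalized.split(".")
--     for i in range(len(parts), 0, -1):
--         candidate = ".".join(parts[:i])
--         if candidate in family_names:
--             tokens = parts[i:]
--             if tokens == [""]:  # the name ends in "." right after the family name: no tokens
--                 tokens = []
--             traits = tuple(t for t in tokens if t in _SOURCE_FAMILY_TRAITS)
--             modifiers = tuple(t for t in tokens if t not in _SOURCE_FAMILY_TRAITS)
--             return candidate, traits, modifiers
--     return None
-- ===== Notes on version B (the rewrite author's own statement) =====
-- stated objective: faster
-- what changed: Instead of sorting the whole family set by length and scanning it for a matching candidate, B looks up each dot-boundary prefix of the normalized name in the set, longest first, and takes the remaining dot-separated tokens directly.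
import Mathlib
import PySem

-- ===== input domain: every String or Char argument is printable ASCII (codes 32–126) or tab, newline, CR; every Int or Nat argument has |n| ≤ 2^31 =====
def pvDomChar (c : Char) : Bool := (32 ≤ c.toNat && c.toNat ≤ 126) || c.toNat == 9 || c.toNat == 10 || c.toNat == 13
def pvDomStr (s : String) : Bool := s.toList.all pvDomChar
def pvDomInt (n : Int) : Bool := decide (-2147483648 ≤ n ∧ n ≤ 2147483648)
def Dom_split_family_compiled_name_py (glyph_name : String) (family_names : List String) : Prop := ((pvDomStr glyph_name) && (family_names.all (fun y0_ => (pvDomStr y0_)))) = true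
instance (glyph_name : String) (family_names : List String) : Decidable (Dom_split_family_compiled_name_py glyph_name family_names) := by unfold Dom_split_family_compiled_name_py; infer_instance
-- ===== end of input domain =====

-- B replaces A's sort-the-family-set-and-scan search by direct set lookups of the
-- dot-boundary prefixes of the normalized name, longest first (objective: faster).

-- ===== PORT A =====
-- module helper get_base_glyph_name (shared by both ports, as in the Python module)
def pvBase (s : List Char) : List Char :=
  if PySem.Chars.endswith s ".prop".toList then PySem.Chars.slice s none (some (-5))
  else if PySem.Chars.isIn ".prop.".toList s then
    -- s.replace(".prop.", ".", 1): replace only the FIRST occurrence — exact,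
    -- since PySem.Chars.find returns the first index of the (present) substring
    let i := (PySem.Chars.find s ".prop.".toList).toNat
    s.take i ++ '.' :: s.drop (i + ".prop.".toList.length)
  else s

-- module constant _SOURCE_FAMILY_TRAITS membership (shared by both ports)
def pvIsTrait (t : List Char) : Bool := t == "alt".toList || t == "half".toList

-- str.removeprefix (exact: drop the prefix iff it is present)
def pvRemoveprefix (s p : List Char) : List Char :=
  if p.isPrefixOf s then s.drop p.length else s

def split_family_compiled_name_py (glyph_name : String) (family_names : List String) : Option (String × List String × List String) :=
  let normalized := pvBase glyph_name.toList
  match (PySem.List.sorted family_names (fun s => s.toList.length) true).find?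
      (fun cand => normalized == cand.toList || PySem.Chars.startswith normalized (cand.toList ++ ['.'])) with
  | none => none
  | some fam =>
    let suffix := pvRemoveprefix (normalized.drop fam.toList.length) ['.']
    if suffix == [] then some (fam, [], [])
    else
      let p := (PySem.Chars.splitOn suffix ['.']).foldl
        (fun (p : List (List Char) × List (List Char)) tok =>
          if pvIsTrait tok then (p.1 ++ [tok], p.2) else (p.1, p.2 ++ [tok])) ([], [])
      some (fam, p.1.map String.ofList, p.2.map String.ofList)

-- ===== PORT B =====
-- the loop 'for i in range(len(parts), 0, -1): … if candidate in family_names: …'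
def pvFindFam (fams : List String) (parts : List (List Char)) : Nat → Option (List Char × List (List Char))
  | 0 => none
  | i + 1 =>
    let cand := PySem.Chars.join ['.'] (parts.take (i + 1))
    if fams.contains (String.ofList cand) then some (cand, parts.drop (i + 1))
    else pvFindFam fams parts i

def split_family_compiled_name_py_alt (glyph_name : String) (family_names : List String) : Option (String × List String × List String) :=
  let normalized := pvBase glyph_name.toList
  let parts := PySem.Chars.splitOn normalized ['.']
  match pvFindFam family_names parts parts.length with
  | none => none
  | some (cand, rest) =>
    let tokens := if rest == [[]] then [] else rest
    some (String.ofList cand, (tokens.filter pvIsTrait).map String.ofList,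
          (tokens.filter (fun t => !pvIsTrait t)).map String.ofList)

-- ===== PRECONDITION & SPEC =====
def Spec_split_family_compiled_name_py (glyph_name : String) (family_names : List String) (out : Option (String × List String × List String)) : Prop := out = split_family_compiled_name_py_alt glyph_name family_names
instance (glyph_name : String) (family_names : List String) (out : Option (String × List String × List String)) : Decidable (Spec_split_family_compiled_name_py glyph_name family_names out) := by unfold Spec_split_family_compiled_name_py; infer_instance

-- ===== CLAIM (what is proved, stated in full; the proofs are below) =====
def Claim_equal_split_family_compiled_name_py : Prop := ∀ (glyph_name : String) (family_names : List String), Dom_split_family_compiled_name_py glyph_name family_names → Spec_split_family_compiled_name_py glyph_name family_names (split_family_compiled_name_py glyph_name family_names)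

-- ===== LEMMAS AND PROOFS =====

theorem pv_modifyHead_id (l : List (List Char)) : List.modifyHead (fun x => x) l = l := by
  cases l <;> simp
theorem pv_go_zero (c : Char) (l cur : List Char) (acc : List (List Char)) :
    PySem.Chars.splitOn.go [c] 0 l cur acc = ((cur.reverse ++ l) :: acc).reverse := by
  rw [PySem.Chars.splitOn.go.eq_def]
theorem pv_go_nil (c : Char) (fuel : Nat) (cur : List Char) (acc : List (List Char)) :
    PySem.Chars.splitOn.go [c] (fuel+1) [] cur acc = (cur.reverse :: acc).reverse := by
  rw [PySem.Chars.splitOn.go.eq_def]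
theorem pv_go_cons (c x : Char) (fuel : Nat) (rest cur : List Char) (acc : List (List Char)) :
    PySem.Chars.splitOn.go [c] (fuel+1) (x::rest) cur acc
    = (if [c].isPrefixOf (x::rest) then PySem.Chars.splitOn.go [c] fuel rest [] (cur.reverse :: acc)
       else PySem.Chars.splitOn.go [c] fuel rest (x :: cur) acc) := by
  rw [PySem.Chars.splitOn.go.eq_def]
  simp
theorem pv_go_spec (c : Char) (fuel : Nat) (l cur : List Char) (acc : List (List Char)) (h : l.length ≤ fuel) :
    PySem.Chars.splitOn.go [c] fuel l cur acc
      = acc.reverse ++ (l.splitOn c).modifyHead (cur.reverse ++ ·) := by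
  induction fuel generalizing l cur acc with
  | zero =>
    have : l = [] := List.eq_nil_of_length_eq_zero (Nat.le_zero.mp h)
    subst this
    rw [pv_go_zero]
    simp [List.splitOn]
  | succ fuel ih =>
    cases l with
    | nil => rw [pv_go_nil]; simp [List.splitOn]
    | cons x rest =>
      simp only [List.length_cons] at h
      rw [pv_go_cons]
      by_cases hx : c = x
      · subst hx
        have hpre : [c].isPrefixOf (c::rest) = true := by simp [List.isPrefixOf]
        rw [if_pos hpre]
        rw [ih _ _ _ (by omega)]
        simp [List.splitOn, List.splitOnP_cons, pv_modifyHead_id]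
      · have hpre : [c].isPrefixOf (x::rest) = false := by
          simp [List.isPrefixOf]; exact fun e => absurd e hx
        rw [if_neg (by simp [hpre])]
        rw [ih _ _ _ (by omega)]
        obtain ⟨hd, tl, hsp⟩ := List.exists_cons_of_ne_nil (List.splitOnP_ne_nil (· == c) rest)
        simp [List.splitOn, List.splitOnP_cons, hsp, beq_iff_eq, Ne.symm hx]
theorem pv_splitOn_single (s : List Char) (c : Char) :
    PySem.Chars.splitOn s [c] = s.splitOn c := by
  show PySem.Chars.splitOn.go [c] (s.length+1) s [] [] = _
  rw [pv_go_spec c (s.length+1) s [] [] (by omega)]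
  simp [pv_modifyHead_id]
theorem pv_not_mem_splitOn (s : List Char) (c : Char) :
    ∀ p ∈ s.splitOn c, c ∉ p := by
  induction s with
  | nil => intro p hp; simp [List.splitOn] at hp; simp [hp]
  | cons x rest ih =>
    intro p hp
    simp only [List.splitOn, List.splitOnP_cons] at hp ih
    by_cases hx : x = c
    · simp [hx] at hp
      rcases hp with h | h
      · simp [h]
      · exact ih p h
    · simp [hx] at hp
      obtain ⟨hd, tl, hsp⟩ := List.exists_cons_of_ne_nil (List.splitOnP_ne_nil (· == c) rest)
      rw [hsp] at hp
      simp at hp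
      rcases hp with h | h
      · subst h
        intro hmem
        rcases List.mem_cons.mp hmem with h | h
        · exact hx h.symm
        · exact ih hd (by rw [hsp]; exact List.mem_cons_self) h
      · exact ih p (by rw [hsp]; exact List.mem_cons_of_mem _ h)

theorem pv_join_append_last (d b : List Char) (xs : List (List Char)) (h : xs ≠ []) :
    PySem.Chars.join d (xs ++ [b]) = PySem.Chars.join d xs ++ d ++ b := by
  induction xs with
  | nil => exact absurd rfl h
  | cons a as ih =>
    cases as with
    | nil =>
      show PySem.Chars.join d [a, b] = _
      rw [PySem.Chars.join_cons_cons, PySem.Chars.join_singleton, PySem.Chars.join_singleton]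
    | cons a' as' =>
      rw [List.cons_append,
          show (a' :: as' ++ [b] : List (List Char)) = a' :: (as' ++ [b]) from rfl,
          PySem.Chars.join_cons_cons,
          show (a' :: (as' ++ [b]) : List (List Char)) = (a' :: as') ++ [b] from rfl,
          ih (by simp), PySem.Chars.join_cons_cons]
      simp [List.append_assoc]

theorem pv_join_take_succ (d : List Char) (ps : List (List Char)) (i : Nat)
    (h1 : 1 ≤ i) (h2 : i < ps.length) :
    PySem.Chars.join d (ps.take (i + 1)) = PySem.Chars.join d (ps.take i) ++ d ++ ps[i] := by
  rw [← List.take_concat_get h2, List.concat_eq_append,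
      pv_join_append_last _ _ _ (by
        rw [Ne, List.take_eq_nil_iff]
        rintro (h | h)
        · omega
        · rw [h] at h2; simp at h2)]

theorem pv_join_split_at (d : List Char) (ps : List (List Char)) (i : Nat)
    (h1 : 1 ≤ i) (h2 : i < ps.length) :
    PySem.Chars.join d ps
      = PySem.Chars.join d (ps.take i) ++ d ++ PySem.Chars.join d (ps.drop i) := by
  induction ps generalizing i with
  | nil => simp at h2
  | cons x rest ih =>
    simp only [List.length_cons] at h2
    obtain ⟨r, rs, hr⟩ := List.exists_cons_of_ne_nil (show rest ≠ [] from by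
      intro h; rw [h] at h2; simp at h2; omega)
    match i, h1 with
    | 1, _ =>
      subst hr
      rw [PySem.Chars.join_cons_cons]
      simp [PySem.Chars.join_singleton]
    | (j+2), _ =>
      have hj2 : j + 1 < rest.length := by omega
      have ihr := ih (j+1) (by omega) hj2
      subst hr
      obtain ⟨q, qs, hq⟩ := List.exists_cons_of_ne_nil (show List.take (j+1) (r::rs) ≠ [] from by simp)
      rw [PySem.Chars.join_cons_cons, ihr]
      rw [show List.take (j+2) (x::r::rs) = x :: List.take (j+1) (r::rs) from rfl]
      rw [show List.drop (j+2) (x::r::rs) = List.drop (j+1) (r::rs) from rfl]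
      rw [hq, PySem.Chars.join_cons_cons, ← hq]
      simp [List.append_assoc]
theorem pv_join_splitOn (s : List Char) (c : Char) :
    PySem.Chars.join [c] (s.splitOn c) = s := by
  rw [PySem.Chars.join.eq_1, List.intercalate_splitOn]

theorem pv_len_lt_succ (ps : List (List Char)) (i : Nat) (h1 : 1 ≤ i) (h2 : i < ps.length) :
    (PySem.Chars.join ['.'] (ps.take i)).length < (PySem.Chars.join ['.'] (ps.take (i+1))).length := by
  rw [pv_join_take_succ _ _ _ h1 h2]
  simp

theorem pv_len_mono (ps : List (List Char)) (i j : Nat)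
    (h1 : 1 ≤ i) (hij : i < j) (hj : j ≤ ps.length) :
    (PySem.Chars.join ['.'] (ps.take i)).length < (PySem.Chars.join ['.'] (ps.take j)).length := by
  induction j with
  | zero => omega
  | succ j ih =>
    rcases Nat.lt_or_ge i j with h | h
    · exact lt_trans (ih h (by omega)) (pv_len_lt_succ ps j (by omega) (by omega))
    · have : i = j := by omega
      subst this
      exact pv_len_lt_succ ps i h1 (by omega)

theorem pv_join_eq_nil (d : List Char) (hd : d ≠ []) (xs : List (List Char))
    (h : PySem.Chars.join d xs = []) : xs = [] ∨ xs = [[]] := by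
  match xs with
  | [] => exact Or.inl rfl
  | [p] => rw [PySem.Chars.join_singleton] at h; right; rw [h]
  | p :: q :: rest =>
    rw [PySem.Chars.join_cons_cons] at h
    simp [hd] at h

theorem pv_match_iff (n : List Char) (c : List Char) :
    ((n == c) || PySem.Chars.startswith n (c ++ ['.'])) = true
      ↔ ∃ i, 1 ≤ i ∧ i ≤ (n.splitOn '.').length
          ∧ c = PySem.Chars.join ['.'] ((n.splitOn '.').take i) := by
  have hk1 : 1 ≤ (n.splitOn '.').length :=
    List.length_pos_iff.mpr (List.splitOnP_ne_nil _ _)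
  constructor
  · intro h
    rcases Bool.or_eq_true_iff.mp h with h | h
    · refine ⟨(n.splitOn '.').length, hk1, le_refl _, ?_⟩
      rw [List.take_length, pv_join_splitOn]
      exact (beq_iff_eq.mp h).symm
    · obtain ⟨t, ht⟩ := (PySem.Chars.startswith_iff _ _).mp h
      rw [List.append_assoc, show (['.'] : List Char) ++ t = '.' :: t from rfl] at ht
      refine ⟨(c.splitOn '.').length, List.length_pos_iff.mpr (List.splitOnP_ne_nil _ _), ?_, ?_⟩
      · rw [← ht]
        rw [show List.splitOn '.' (c ++ '.' :: t) = List.splitOnP (· == '.') (c ++ '.' :: t) from rfl]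
        rw [List.splitOnP_append_cons _ _ _ _ (by simp)]
        have := List.length_pos_iff.mpr (List.splitOnP_ne_nil (· == '.') t)
        simp [List.splitOn]
      · rw [← ht]
        rw [show List.splitOn '.' (c ++ '.' :: t) = List.splitOnP (· == '.') (c ++ '.' :: t) from rfl]
        rw [List.splitOnP_append_cons _ _ _ _ (by simp)]
        rw [show List.splitOnP (fun x => x == '.') c = c.splitOn '.' from rfl]
        rw [List.take_left]
        rw [pv_join_splitOn]
  · rintro ⟨i, h1, h2, hc⟩
    rcases Nat.lt_or_ge i (n.splitOn '.').length with h | h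
    · apply Bool.or_eq_true_iff.mpr; right
      apply (PySem.Chars.startswith_iff _ _).mpr
      have := pv_join_split_at ['.'] (n.splitOn '.') i h1 h
      rw [pv_join_splitOn] at this
      rw [hc]
      exact ⟨_, this.symm⟩
    · have : i = (n.splitOn '.').length := by omega
      subst this
      apply Bool.or_eq_true_iff.mpr; left
      rw [List.take_length, pv_join_splitOn] at hc
      simp [hc]
theorem pv_findFam_none (fams : List String) (parts : List (List Char)) (m : Nat)
    (h : pvFindFam fams parts m = none) :
    ∀ i, 1 ≤ i → i ≤ m → fams.contains (String.ofList (PySem.Chars.join ['.'] (parts.take i))) = false := by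
  induction m with
  | zero => intro i h1 h2; omega
  | succ m ih =>
    rw [pvFindFam] at h

    split at h
    · exact absurd h (by simp)
    · intro i h1 h2
      rcases Nat.lt_or_ge i (m+1) with hi | hi
      · exact ih h i h1 (by omega)
      · have : i = m + 1 := by omega
        subst this
        rename_i hnc
        exact (Bool.not_eq_true _) ▸ hnc

theorem pv_findFam_some (fams : List String) (parts : List (List Char)) (m : Nat)
    (cand : List Char) (rest : List (List Char))
    (h : pvFindFam fams parts m = some (cand, rest)) :
    ∃ i, 1 ≤ i ∧ i ≤ m ∧ cand = PySem.Chars.join ['.'] (parts.take i) ∧ rest = parts.drop i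
      ∧ fams.contains (String.ofList cand) = true
      ∧ ∀ j, i < j → j ≤ m → fams.contains (String.ofList (PySem.Chars.join ['.'] (parts.take j))) = false := by
  induction m with
  | zero => simp [pvFindFam] at h
  | succ m ih =>
    rw [pvFindFam] at h

    split at h
    · rename_i hcon
      rw [Option.some.injEq, Prod.mk.injEq] at h
      obtain ⟨hcand, hrest⟩ := h
      exact ⟨m+1, by omega, le_refl _, hcand.symm, hrest.symm, hcand ▸ hcon,
        fun j hj1 hj2 => by omega⟩
    · obtain ⟨i, h1, h2, hc, hr, hmem, hmax⟩ := ih h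
      refine ⟨i, h1, by omega, hc, hr, hmem, ?_⟩
      intro j hj1 hj2
      rcases Nat.lt_or_ge j (m+1) with hj | hj
      · exact hmax j hj1 (by omega)
      · have : j = m + 1 := by omega
        subst this
        rename_i hnc
        exact (Bool.not_eq_true _) ▸ hnc

theorem pv_foldl_pair (l acc1 acc2 : List (List Char)) :
    l.foldl (fun (p : List (List Char) × List (List Char)) tok =>
        if pvIsTrait tok then (p.1 ++ [tok], p.2) else (p.1, p.2 ++ [tok])) (acc1, acc2)
      = (acc1 ++ l.filter pvIsTrait, acc2 ++ l.filter (fun t => !pvIsTrait t)) := by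
  induction l generalizing acc1 acc2 with
  | nil => simp
  | cons x xs ih =>
    by_cases hx : pvIsTrait x
    · simp [List.foldl_cons, hx, ih]
    · simp [List.foldl_cons, hx, ih]

theorem pv_main (n : List Char) (fams : List String) :
    (match List.find? (fun cand => n == cand.toList || PySem.Chars.startswith n (cand.toList ++ ['.']))
        (PySem.List.sorted fams (fun s => s.toList.length) true) with
     | none => none
     | some fam =>
       let suffix := pvRemoveprefix (List.drop fam.toList.length n) ['.']
       if suffix == [] then some (fam, ([] : List String), ([] : List String))
       else
         let p := List.foldl (fun (p : List (List Char) × List (List Char)) tok =>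
             if pvIsTrait tok then (p.1 ++ [tok], p.2) else (p.1, p.2 ++ [tok])) ([], [])
           (PySem.Chars.splitOn suffix ['.'])
         some (fam, p.1.map String.ofList, p.2.map String.ofList)) =
    (match pvFindFam fams (PySem.Chars.splitOn n ['.']) (PySem.Chars.splitOn n ['.']).length with
     | none => none
     | some (cand, rest) =>
       let tokens := if rest == [[]] then [] else rest
       some (String.ofList cand, (tokens.filter pvIsTrait).map String.ofList,
         (tokens.filter (fun t => !pvIsTrait t)).map String.ofList)) := by
  simp only [pv_splitOn_single]
  set parts := n.splitOn '.' with hparts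
  set k := parts.length with hk
  have hk1 : 1 ≤ k := hk ▸ List.length_pos_iff.mpr (List.splitOnP_ne_nil _ _)
  have hjoin : PySem.Chars.join ['.'] parts = n := pv_join_splitOn n '.'
  cases hfind : pvFindFam fams parts k with
  | none =>
    have hnone : List.find? (fun cand => n == cand.toList || PySem.Chars.startswith n (cand.toList ++ ['.']))
        (PySem.List.sorted fams (fun s => s.toList.length) true) = none := by
      apply List.find?_eq_none.mpr
      intro x hx hpx
      obtain ⟨i, h1, h2, hc⟩ := (pv_match_iff n x.toList).mp hpx
      have hxmem : x ∈ fams := (PySem.List.sorted_perm fams (fun s => s.toList.length) true).mem_iff.mp hx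
      have hfalse := pv_findFam_none fams parts k hfind i h1 h2
      rw [← hc, String.ofList_toList] at hfalse
      rw [← List.contains_iff_mem] at hxmem
      rw [hxmem] at hfalse
      exact Bool.true_eq_false ▸ hfalse
    rw [hnone]
  | some pr =>
    obtain ⟨cand, rest⟩ := pr
    obtain ⟨i₀, hi1, hi2, hcand, hrest, hcon, hmax⟩ := pv_findFam_some fams parts k cand rest hfind
    have hs₀mem : String.ofList cand ∈ fams := List.contains_iff_mem.mp hcon
    have hps₀ : (fun cand => n == cand.toList || PySem.Chars.startswith n (cand.toList ++ ['.']))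
        (String.ofList cand) = true := by
      apply (pv_match_iff n _).mpr
      exact ⟨i₀, hi1, hi2, by rw [String.toList_ofList]; exact hcand⟩
    have hLmem : String.ofList cand ∈ PySem.List.sorted fams (fun s => s.toList.length) true :=
      (PySem.List.sorted_perm fams (fun s => s.toList.length) true).mem_iff.mpr hs₀mem
    cases hfA : List.find? (fun cand => n == cand.toList || PySem.Chars.startswith n (cand.toList ++ ['.']))
        (PySem.List.sorted fams (fun s => s.toList.length) true) with
    | none => exact absurd hps₀ (List.find?_eq_none.mp hfA _ hLmem)
    | some c =>
      obtain ⟨hpc, as, bs, hL, has⟩ := List.find?_eq_some_iff_append.mp hfA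
      obtain ⟨ic, hic1, hic2, hcic⟩ := (pv_match_iff n c.toList).mp hpc
      have hcmem : c ∈ fams := (PySem.List.sorted_perm fams (fun s => s.toList.length) true).mem_iff.mp
        (hL ▸ List.mem_append_right as (List.mem_cons_self ..))
      have hic_le : ic ≤ i₀ := by
        by_contra hlt
        have hbad := hmax ic (by omega) hic2
        rw [← hcic, String.ofList_toList] at hbad
        rw [← List.contains_iff_mem] at hcmem
        rw [hcmem] at hbad
        exact Bool.true_eq_false ▸ hbad
      have hlen : cand.length ≤ c.toList.length := by
        rcases List.mem_append.mp (hL ▸ hLmem) with hmem | hmem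
        · have h1 := has _ hmem
          have h2 : (n == (String.ofList cand).toList || PySem.Chars.startswith n ((String.ofList cand).toList ++ ['.'])) = true := hps₀
          rw [h2] at h1
          exact absurd h1 (by simp)
        · rcases List.mem_cons.mp hmem with he | hmem
          · rw [← he, String.toList_ofList]
          · have hpair := PySem.List.sorted_pairwise_rev fams (fun s => s.toList.length)
            rw [hL] at hpair
            have h2 := (List.pairwise_append.mp hpair).2.1
            have h3 := (List.pairwise_cons.mp h2).1 _ hmem
            rw [String.toList_ofList] at h3
            exact h3
      have hieq : ic = i₀ := by
        by_contra hne
        have hlt : ic < i₀ := by omega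
        have hlt2 := pv_len_mono parts ic i₀ hic1 hlt hi2
        rw [← hcic] at hlt2
        rw [hcand] at hlen
        omega
      have hceq : c = String.ofList cand := by
        have : c.toList = cand := by rw [hcic, hieq, ← hcand]
        rw [← this, String.ofList_toList]
      subst hceq
      show (let suffix := pvRemoveprefix (List.drop (String.ofList cand).toList.length n) ['.']
            if suffix == [] then some (String.ofList cand, ([] : List String), ([] : List String))
            else
              let p := List.foldl (fun (p : List (List Char) × List (List Char)) tok =>
                  if pvIsTrait tok then (p.1 ++ [tok], p.2) else (p.1, p.2 ++ [tok])) ([], [])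
                (List.splitOn '.' suffix)
              some (String.ofList cand, p.1.map String.ofList, p.2.map String.ofList)) =
          (let tokens := if rest == [[]] then [] else rest
           some (String.ofList cand, (tokens.filter pvIsTrait).map String.ofList,
             (tokens.filter (fun t => !pvIsTrait t)).map String.ofList))
      rw [String.toList_ofList]
      rcases Nat.lt_or_ge i₀ k with hik | hik
      · -- i₀ < k : a proper suffix remains after the family name
        have hsplit := pv_join_split_at ['.'] parts i₀ hi1 hik
        rw [hjoin] at hsplit
        have hdrop : List.drop cand.length n = '.' :: PySem.Chars.join ['.'] (List.drop i₀ parts) := by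
          conv_lhs => rw [hcand, hsplit]
          rw [List.append_assoc, List.drop_left]
          rfl
        rw [hdrop]
        have hrp : pvRemoveprefix ('.' :: PySem.Chars.join ['.'] (List.drop i₀ parts)) ['.']
            = PySem.Chars.join ['.'] (List.drop i₀ parts) := by
          unfold pvRemoveprefix
          simp [List.isPrefixOf]
        rw [hrp]
        have hdne : List.drop i₀ parts ≠ [] := by
          intro h0
          have := congrArg List.length h0
          simp [List.length_drop] at this
          omega
        by_cases hone : List.drop i₀ parts = [[]]
        · rw [hone, PySem.Chars.join_singleton, hrest, hone]
          simp
        · have hjdne : PySem.Chars.join ['.'] (List.drop i₀ parts) ≠ [] := by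
            intro h0
            rcases pv_join_eq_nil ['.'] (by simp) _ h0 with h | h
            · exact hdne h
            · exact hone h
          have hsp : List.splitOn '.' (PySem.Chars.join ['.'] (List.drop i₀ parts)) = List.drop i₀ parts := by
            rw [PySem.Chars.join.eq_1]
            exact List.splitOn_intercalate _ '.'
              (fun l hl => pv_not_mem_splitOn n '.' l (List.mem_of_mem_drop hl)) hdne
          simp only [hsp]
          rw [if_neg (by simp [hjdne])]
          simp only [pv_foldl_pair]
          rw [hrest, if_neg (by simp [hone])]
          simp
      · -- i₀ = k : the family name is the whole normalized name
        have hik' : i₀ = k := le_antisymm hi2 hik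
        have hcn : cand = n := by
          rw [hcand, hik', hk, List.take_length, hjoin]
        have hdrop : List.drop cand.length n = [] := by
          rw [hcn, List.drop_length]
        rw [hdrop]
        have hrp : pvRemoveprefix [] ['.'] = [] := by
          unfold pvRemoveprefix
          simp [List.isPrefixOf]
        rw [hrp]
        have hrest0 : rest = [] := by
          rw [hrest, hik', hk, List.drop_length]
        rw [hrest0]
        simp

theorem pv_ports_eq (g : String) (fams : List String) :
    split_family_compiled_name_py g fams = split_family_compiled_name_py_alt g fams := by
  unfold split_family_compiled_name_py split_family_compiled_name_py_alt
  exact pv_main (pvBase g.toList) fams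

-- ===== VERDICT (by name: the statement is the Claim_ definition above) =====
theorem split_family_compiled_name_py_spec : Claim_equal_split_family_compiled_name_py := by
  intro g fams _
  exact pv_ports_eq g fams
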